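-- pv_equiv track=rewrite | github.com/chinedu-2002/tip101 | class_work/week_2_dict/unit2_s1_problem1.py | restock_inventory
-- ===== SOURCE A (Python) =====
-- def restock_inventory(current_inventory, restock_list):
--
--     for key in current_inventory:
--         if key in restock_list:
--             current_inventory[key] += restock_list[key]
--     for key in restock_list:
--         if key not in current_inventory:
--             current_inventory[key] = restock_list[key]
--     return current_inventory
-- ===== SOURCE B (Python) =====
-- def restock_inventory(current_inventory, restock_list):
--     for key, value in restock_list.items():
--         current_inventory[key] = current_inventory.get(key, 0) + value
--     return current_inventory
-- ===== Notes on version B (the rewrite author's own statement) =====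
-- stated objective: simpler
-- what changed: Replaces A's two passes (update existing keys, then add missing keys) with a single pass over restock_list using get-with-default.
import Mathlib
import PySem

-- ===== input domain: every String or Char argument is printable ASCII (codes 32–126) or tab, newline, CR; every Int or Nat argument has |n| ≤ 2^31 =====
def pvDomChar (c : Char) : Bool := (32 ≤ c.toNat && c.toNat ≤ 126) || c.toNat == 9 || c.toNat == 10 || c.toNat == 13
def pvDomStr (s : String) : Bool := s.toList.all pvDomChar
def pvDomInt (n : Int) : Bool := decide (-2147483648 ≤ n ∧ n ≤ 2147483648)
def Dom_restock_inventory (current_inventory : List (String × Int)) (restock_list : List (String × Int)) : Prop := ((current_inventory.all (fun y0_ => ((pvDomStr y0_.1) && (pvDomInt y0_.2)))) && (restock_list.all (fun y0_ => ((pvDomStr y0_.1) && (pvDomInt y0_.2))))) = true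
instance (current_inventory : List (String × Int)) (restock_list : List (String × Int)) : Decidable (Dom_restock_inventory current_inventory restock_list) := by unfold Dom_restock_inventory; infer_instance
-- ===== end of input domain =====

-- B replaces A's two passes (update keys present in both, then add missing keys) with one
-- pass over restock_list using get-with-default; both versions mutate current_inventory in
-- place in Python in the same way, and the proved equivalence is about the returned dict.

-- ===== PORT A =====
def restock_inventory (current_inventory : List (String × Int)) (restock_list : List (String × Int)) : List (String × Int) :=
  let inv := PySem.Dict.ofList current_inventory
  let rst := PySem.Dict.ofList restock_list
  -- for key in current_inventory: if key in restock_list: current_inventory[key] += restock_list[key]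
  let inv1 := inv.keys.foldl (fun acc k =>
      if rst.contains k then acc.modify k 0 (· + rst.getD k 0) else acc) inv
  -- for key in restock_list: if key not in current_inventory: current_inventory[key] = restock_list[key]
  let inv2 := rst.keys.foldl (fun acc k =>
      if acc.contains k then acc else acc.insert k (rst.getD k 0)) inv1
  inv2.items

-- ===== PORT B =====
def restock_inventory_alt (current_inventory : List (String × Int)) (restock_list : List (String × Int)) : List (String × Int) :=
  let inv := PySem.Dict.ofList current_inventory
  let rst := PySem.Dict.ofList restock_list
  -- for key, value in restock_list.items(): current_inventory[key] = current_inventory.get(key, 0) + value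
  (rst.items.foldl (fun acc p => acc.insert p.1 (acc.getD p.1 0 + p.2)) inv).items

-- ===== PRECONDITION & SPEC =====
def Spec_restock_inventory (current_inventory : List (String × Int)) (restock_list : List (String × Int)) (out : List (String × Int)) : Prop := out = restock_inventory_alt current_inventory restock_list
instance (current_inventory : List (String × Int)) (restock_list : List (String × Int)) (out : List (String × Int)) : Decidable (Spec_restock_inventory current_inventory restock_list out) := by unfold Spec_restock_inventory; infer_instance

-- ===== CLAIM (what is proved, stated in full; the proofs are below) =====
def Claim_equal_restock_inventory : Prop := ∀ (current_inventory : List (String × Int)) (restock_list : List (String × Int)), Dom_restock_inventory current_inventory restock_list → Spec_restock_inventory current_inventory restock_list (restock_inventory current_inventory restock_list)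

-- ===== LEMMAS AND PROOFS =====

-- A's first loop: modifying each existing key once rewrites the items list pointwise.
theorem pv_modfold (r : PySem.Dict String Int) :
    ∀ (l : List String) (d : PySem.Dict String Int), d.keys.Nodup → l.Nodup →
    (∀ k ∈ l, d.contains k = true) →
    (l.foldl (fun acc k => if r.contains k then acc.modify k 0 (· + r.getD k 0) else acc) d).items
      = d.items.map (fun q => if q.1 ∈ l ∧ r.contains q.1 = true then (q.1, q.2 + r.getD q.1 0) else q)
  | [], d, _, _, _ => by simp
  | k :: t, d, hd, hnd, hsub => by
    have hk : k ∉ t := (List.nodup_cons.mp hnd).1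
    have ht : t.Nodup := (List.nodup_cons.mp hnd).2
    have hdk : d.contains k = true := hsub k (by simp)
    simp only [List.foldl_cons]
    by_cases hc : r.contains k = true
    · rw [if_pos hc]
      have hmod : d.modify k 0 (· + r.getD k 0) = d.insert k (d.getD k 0 + r.getD k 0) := rfl
      have hkeys : (d.insert k (d.getD k 0 + r.getD k 0)).keys = d.keys :=
        PySem.Dict.keys_insert_of_contains d _ hdk
      have hd' : (d.insert k (d.getD k 0 + r.getD k 0)).keys.Nodup := by rw [hkeys]; exact hd
      have hsub' : ∀ k' ∈ t, (d.insert k (d.getD k 0 + r.getD k 0)).contains k' = true := by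
        intro k' hk'
        rw [PySem.Dict.contains_insert]
        simp [hsub k' (by simp [hk'])]
      rw [hmod, pv_modfold r t _ hd' ht hsub',
        PySem.Dict.items_insert_of_contains d _ hdk, List.map_map]
      apply List.map_congr_left
      intro q hq
      by_cases hqk : q.1 = k
      · have hv : d.getD q.1 0 = q.2 := PySem.Dict.getD_of_mem_items d hq hd 0
        have hkt : k ∉ t := hk
        simp [Function.comp, hqk, ← hv, hkt, hc]
      · simp [Function.comp, hqk]
    · rw [if_neg hc, pv_modfold r t d hd ht (fun k' hk' => hsub k' (by simp [hk']))]
      apply List.map_congr_left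
      intro q hq
      by_cases hqk : q.1 = k
      · simp [hqk, eq_false_of_ne_true hc]
      · simp [hqk]

-- A's second loop: inserting the missing keys appends them in order.
theorem pv_setfold (r : PySem.Dict String Int) :
    ∀ (l : List String) (d : PySem.Dict String Int), l.Nodup →
    (l.foldl (fun acc k => if acc.contains k then acc else acc.insert k (r.getD k 0)) d).items
      = d.items ++ (l.filter (fun k => !d.contains k)).map (fun k => (k, r.getD k 0))
  | [], d, _ => by simp
  | k :: t, d, hnd => by
    have hk : k ∉ t := by simp [List.nodup_cons] at hnd; exact hnd.1
    have ht : t.Nodup := (List.nodup_cons.mp hnd).2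
    simp only [List.foldl_cons]
    by_cases hc : d.contains k = true
    · rw [if_pos hc, pv_setfold r t d ht]
      simp [hc]
    · rw [if_neg hc, pv_setfold r t (d.insert k (r.getD k 0)) ht,
        PySem.Dict.items_insert_of_not_contains d _ (by simpa using hc)]
      have hfilt : t.filter (fun k' => !(d.insert k (r.getD k 0)).contains k')
          = t.filter (fun k' => !d.contains k') := by
        apply List.filter_congr
        intro k' hk'
        have hne : k' ≠ k := fun h => hk (h ▸ hk')
        simp [PySem.Dict.contains_insert, hne]
      rw [hfilt]
      simp [eq_false_of_ne_true hc]

-- B's single loop: get-with-default + insert updates present keys in place and appends fresh ones.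
theorem pv_insfold :
    ∀ (l : List (String × Int)) (d : PySem.Dict String Int), d.keys.Nodup → (l.map (·.1)).Nodup →
    (l.foldl (fun acc p => acc.insert p.1 (acc.getD p.1 0 + p.2)) d).items
      = d.items.map (fun q => match l.find? (fun p => p.1 == q.1) with
          | some p => (q.1, q.2 + p.2)
          | none => q)
        ++ (l.filter (fun p => !d.contains p.1)).map (fun p => (p.1, p.2))
  | [], d, _, _ => by simp
  | p :: t, d, hd, hnd => by
    have hnd' : (p.1 :: t.map (·.1)).Nodup := by simpa using hnd
    have hk : p.1 ∉ t.map (·.1) := (List.nodup_cons.mp hnd').1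
    have ht : (t.map (·.1)).Nodup := (List.nodup_cons.mp hnd').2
    simp only [List.foldl_cons]
    by_cases hc : d.contains p.1 = true
    · have hkeys : (d.insert p.1 (d.getD p.1 0 + p.2)).keys = d.keys :=
        PySem.Dict.keys_insert_of_contains d _ hc
      have hd' : (d.insert p.1 (d.getD p.1 0 + p.2)).keys.Nodup := by rw [hkeys]; exact hd
      rw [pv_insfold t _ hd' ht, PySem.Dict.items_insert_of_contains d _ hc, List.map_map]
      have hfilt : t.filter (fun p' => !(d.insert p.1 (d.getD p.1 0 + p.2)).contains p'.1)
          = t.filter (fun p' => !d.contains p'.1) := by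
        apply List.filter_congr
        intro p' _
        rw [PySem.Dict.contains_insert]
        by_cases h : p'.1 = p.1
        · simp [h, hc]
        · simp [h]
      rw [hfilt]
      have hhead : List.filter (fun p' => !d.contains p'.1) (p :: t)
          = t.filter (fun p' => !d.contains p'.1) := by
        simp [hc]
      rw [hhead]
      congr 1
      apply List.map_congr_left
      intro q hq
      by_cases hqk : q.1 = p.1
      · have hv : d.getD q.1 0 = q.2 := PySem.Dict.getD_of_mem_items d hq hd 0
        have hnof : t.find? (fun p' => p'.1 == p.1) = none := by
          rw [List.find?_eq_none]
          intro p' hp'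
          simp only [beq_iff_eq]
          intro h
          exact hk (h ▸ List.mem_map_of_mem hp')
        simp [Function.comp, hqk, ← hv, hnof]
      · simp [Function.comp, hqk, Ne.symm hqk]
    · have hv0 : d.getD p.1 0 = 0 := PySem.Dict.getD_of_not_contains d 0 (eq_false_of_ne_true hc)
      have hd' : (d.insert p.1 (d.getD p.1 0 + p.2)).keys.Nodup :=
        PySem.Dict.nodup_keys_insert d _ _ hd
      rw [pv_insfold t _ hd' ht,
        PySem.Dict.items_insert_of_not_contains d _ (eq_false_of_ne_true hc), List.map_append]
      have hfilt : t.filter (fun p' => !(d.insert p.1 (d.getD p.1 0 + p.2)).contains p'.1)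
          = t.filter (fun p' => !d.contains p'.1) := by
        apply List.filter_congr
        intro p' hp'
        have hne : p'.1 ≠ p.1 := fun h => hk (h ▸ List.mem_map_of_mem hp')
        rw [PySem.Dict.contains_insert]
        simp [hne]
      rw [hfilt]
      have hnof : t.find? (fun p' => p'.1 == p.1) = none := by
        rw [List.find?_eq_none]
        intro p' hp'
        simp only [beq_iff_eq]
        intro h
        exact hk (h ▸ List.mem_map_of_mem hp')
      have hsingle : ([(p.1, d.getD p.1 0 + p.2)].map (fun q =>
          match t.find? (fun p' => p'.1 == q.1) with
          | some p' => (q.1, q.2 + p'.2)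
          | none => q)) = [(p.1, p.2)] := by
        simp [hnof, hv0]
      rw [hsingle]
      have hhead : List.filter (fun p' => !d.contains p'.1) (p :: t)
          = p :: t.filter (fun p' => !d.contains p'.1) := by
        simp [eq_false_of_ne_true hc]
      rw [hhead, List.map_cons, List.append_assoc]
      congr 1
      apply List.map_congr_left
      intro q hq
      have hqk : q.1 ≠ p.1 := by
        intro h
        have : q.1 ∈ d.keys := PySem.Dict.mem_keys_of_mem_items d hq
        rw [← PySem.Dict.contains_iff_mem_keys] at this
        exact hc (h ▸ this)
      simp [Ne.symm hqk]

-- ===== VERDICT (by name: the statement is the Claim_ definition above) =====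
-- The first loop of A rewrites values in place, so it keeps the key list of the inventory.
theorem pv_keys1 (rst inv : PySem.Dict String Int) (h : inv.keys.Nodup) :
    (inv.keys.foldl (fun acc k => if rst.contains k then acc.modify k 0 (· + rst.getD k 0) else acc) inv).keys
      = inv.keys := by
  show (inv.keys.foldl (fun acc k => if rst.contains k then acc.modify k 0 (· + rst.getD k 0) else acc) inv).items.map (·.1)
      = inv.items.map (·.1)
  rw [pv_modfold rst inv.keys inv h h
      (fun k hk => (PySem.Dict.contains_iff_mem_keys inv k).mpr hk), List.map_map]
  apply List.map_congr_left
  intro q _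
  by_cases hq : q.1 ∈ inv.keys ∧ rst.contains q.1 = true
  · simp [Function.comp, hq]
  · simp [Function.comp, hq]

theorem restock_inventory_spec : Claim_equal_restock_inventory := by
  intro ci rl _
  unfold Spec_restock_inventory restock_inventory restock_inventory_alt
  simp only []
  have hinv : (PySem.Dict.ofList ci).keys.Nodup := PySem.Dict.nodup_keys_ofList ci
  have hrst : (PySem.Dict.ofList rl).keys.Nodup := PySem.Dict.nodup_keys_ofList rl
  set inv := PySem.Dict.ofList ci with hinvdef
  set rst := PySem.Dict.ofList rl with hrstdef
  set inv1 := inv.keys.foldl (fun acc k => if rst.contains k then acc.modify k 0 (· + rst.getD k 0) else acc) inv with hinv1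
  have hcont1 : ∀ k, inv1.contains k = inv.contains k := by
    intro k
    rw [PySem.Dict.contains_eq_decide_mem_keys, PySem.Dict.contains_eq_decide_mem_keys,
      hinv1, pv_keys1 rst inv hinv]
  rw [pv_setfold rst rst.keys inv1 hrst]
  rw [hinv1, pv_modfold rst inv.keys inv hinv hinv
      (fun k hk => (PySem.Dict.contains_iff_mem_keys inv k).mpr hk)]
  rw [pv_insfold rst.items inv hinv hrst]
  congr 1
  · -- the rewritten original items agree pointwise
    apply List.map_congr_left
    intro q hq
    have hqm : q.1 ∈ inv.keys := PySem.Dict.mem_keys_of_mem_items inv hq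
    have hget : rst.get? q.1 = (rst.items.find? (fun p => p.1 == q.1)).map (·.2) := rfl
    cases hfind : rst.items.find? (fun p => p.1 == q.1) with
    | some p =>
      have hsome : rst.get? q.1 = some p.2 := by rw [hget, hfind]; rfl
      have hc : rst.contains q.1 = true := by
        rw [PySem.Dict.contains_eq_isSome_get?, hsome]; rfl
      have hgd : rst.getD q.1 0 = p.2 := by
        rw [PySem.Dict.getD_eq_get?_getD, hsome]; rfl
      simp [hqm, hc, hgd]
    | none =>
      have hnone : rst.get? q.1 = none := by rw [hget, hfind]; rfl
      have hc : rst.contains q.1 = false := by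
        rw [PySem.Dict.contains_eq_isSome_get?, hnone]; rfl
      simp [hc]
  · -- the appended fresh items agree
    have hkr : rst.keys = rst.items.map (·.1) := rfl
    rw [hkr]
    have hfc : ∀ k, (fun k => !inv1.contains k) k = (fun k => !inv.contains k) k := by
      intro k; simp only [hcont1]
    rw [List.filter_congr (fun k _ => hfc k), List.filter_map, List.map_map]
    apply List.map_congr_left
    intro p hp
    have hpm : p ∈ rst.items := List.mem_of_mem_filter hp
    have hgd : rst.getD p.1 0 = p.2 := PySem.Dict.getD_of_mem_items rst hpm hrst 0
    simp [Function.comp, hgd]
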